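-- pv_equiv track=rewrite | github.com/yosuanicolaus/competitive-programming | codeforces_python/B_Upscaling.py | solve
-- ===== SOURCE A (Python) =====
-- def solve(n: int) -> list[str]:
--     ans = [["." for _ in range(n * 2)] for _ in range(n * 2)]
--
--     for y in range(0, n * 2, 2):
--         for x in range(0, n * 2, 2):
--             if y % 4 == 0:
--                 if x % 4 == 0:
--                     ans[y][x] = "#"
--                     ans[y][x + 1] = "#"
--                     ans[y + 1][x] = "#"
--                     ans[y + 1][x + 1] = "#"
--             elif y % 2 == 0:
--                 if (x + 2) % 4 == 0:
--                     ans[y][x] = "#"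
--                     ans[y][x + 1] = "#"
--                     ans[y + 1][x] = "#"
--                     ans[y + 1][x + 1] = "#"
--
--     return ans
-- ===== SOURCE B (Python) =====
-- def solve(n: int) -> list[str]:
--     return [["#" if (i // 2 + j // 2) % 2 == 0 else "." for j in range(n * 2)]
--             for i in range(n * 2)]
-- ===== Notes on version B (the rewrite author's own statement) =====
-- stated objective: simpler
-- what changed: Replaces A's build-then-mutate block loops (allocate an all-'.' grid, then step by 2 over block corners and overwrite four cells per block under y%4/x%4 branching) with a single comprehension that computes every cell directly from the closed-form block parity (i//2 + j//2) % 2.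
import Mathlib
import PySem

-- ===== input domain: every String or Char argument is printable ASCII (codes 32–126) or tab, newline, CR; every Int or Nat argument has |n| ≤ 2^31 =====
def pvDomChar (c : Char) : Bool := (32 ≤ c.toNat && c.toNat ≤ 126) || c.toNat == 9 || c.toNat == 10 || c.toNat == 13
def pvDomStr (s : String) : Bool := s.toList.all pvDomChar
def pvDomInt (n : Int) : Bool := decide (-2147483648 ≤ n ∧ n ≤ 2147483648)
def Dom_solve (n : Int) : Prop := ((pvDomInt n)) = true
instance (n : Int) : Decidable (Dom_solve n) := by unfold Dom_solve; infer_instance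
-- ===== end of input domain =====

-- B replaces A's build-then-mutate block-stepping loops by one comprehension computing each
-- cell from the closed-form block parity (i//2 + j//2) % 2 (objective: simpler).

-- ===== PORT A =====
-- ans[y][x] = "#"  (indices are always nonnegative and in range here; pyGetD's default is never used)
def setCell (g : List (List String)) (y x : Int) : List (List String) :=
  PySem.List.pySetD g y (PySem.List.pySetD (PySem.List.pyGetD g y []) x "#")

-- the four assignments of one 2×2 block
def setBlock (g : List (List String)) (y x : Int) : List (List String) :=
  setCell (setCell (setCell (setCell g y x) y (x + 1)) (y + 1) x) (y + 1) (x + 1)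

def solve (n : Int) : List (List String) :=
  let ans := (PySem.List.pyRange 0 (n * 2) 1).map
    (fun _ => (PySem.List.pyRange 0 (n * 2) 1).map (fun _ => "."))
  (PySem.List.pyRange 0 (n * 2) 2).foldl (fun ans y =>
    (PySem.List.pyRange 0 (n * 2) 2).foldl (fun ans x =>
      if PySem.Int.mod y 4 = 0 then
        if PySem.Int.mod x 4 = 0 then setBlock ans y x else ans
      else if PySem.Int.mod y 2 = 0 then
        if PySem.Int.mod (x + 2) 4 = 0 then setBlock ans y x else ans
      else ans) ans) ans

-- ===== PORT B =====
def solve_alt (n : Int) : List (List String) :=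
  (PySem.List.pyRange 0 (n * 2) 1).map (fun i =>
    (PySem.List.pyRange 0 (n * 2) 1).map (fun j =>
      if PySem.Int.mod (PySem.Int.floordiv i 2 + PySem.Int.floordiv j 2) 2 = 0 then "#" else "."))

-- ===== PRECONDITION & SPEC =====
def Spec_solve (n : Int) (out : List (List String)) : Prop := out = solve_alt n
instance (n : Int) (out : List (List String)) : Decidable (Spec_solve n out) := by unfold Spec_solve; infer_instance

-- ===== CLAIM (what is proved, stated in full; the proofs are below) =====
def Claim_equal_solve : Prop := ∀ (n : Int), Dom_solve n → Spec_solve n (solve n)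

-- ===== LEMMAS AND PROOFS =====

-- a cell of the grid, by Nat indices
def cellAt (g : List (List String)) (i j : Nat) : Option String := (g[i]?.getD [])[j]?

-- the grid is m×m
def OKGrid (m : Nat) (g : List (List String)) : Prop :=
  g.length = m ∧ ∀ r ∈ g, r.length = m

lemma fmod_pos (a b : Int) (hb : 0 < b) : PySem.Int.mod a b = a % b := by
  simp [PySem.Int.mod, Int.fmod_eq_emod, le_of_lt hb]

lemma OK_setCell (m : Nat) (g : List (List String)) (hg : OKGrid m g) (y x : Int)
    (hy : 0 ≤ y) (hym : y.toNat < m) :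
    OKGrid m (setCell g y x) := by
  rcases hg with ⟨h1, h2⟩
  have hyl : y.toNat < g.length := by omega
  have hrow : g.getD y.toNat [] = g[y.toNat] := List.getD_eq_getElem _ _ hyl
  refine ⟨by simp [setCell, PySem.List.pySetD_of_nonneg _ _ hy, h1], ?_⟩
  intro r hr
  simp only [setCell, PySem.List.pySetD_of_nonneg _ _ hy,
    PySem.List.pyGetD_of_nonneg _ _ hy, hrow] at hr
  rcases List.mem_or_eq_of_mem_set hr with h | h
  · exact h2 r h
  · subst h
    rw [PySem.List.length_pySetD]
    exact h2 _ (List.getElem_mem hyl)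

lemma cell_setCell (m : Nat) (g : List (List String)) (hg : OKGrid m g) (y x : Int)
    (hy : 0 ≤ y) (hx : 0 ≤ x) (hym : y.toNat < m) (hxm : x.toNat < m) (i j : Nat) :
    cellAt (setCell g y x) i j =
      if i = y.toNat ∧ j = x.toNat then some "#" else cellAt g i j := by
  rcases hg with ⟨h1, h2⟩
  have hyl : y.toNat < g.length := by omega
  have hrow : g.getD y.toNat [] = g[y.toNat] := List.getD_eq_getElem _ _ hyl
  have hrlen : (g[y.toNat]).length = m := h2 _ (List.getElem_mem hyl)
  simp only [setCell, PySem.List.pySetD_of_nonneg _ _ hy, PySem.List.pySetD_of_nonneg _ _ hx,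
    PySem.List.pyGetD_of_nonneg _ _ hy, hrow, cellAt]
  by_cases hiy : i = y.toNat
  · subst hiy
    rw [List.getElem?_set]
    simp only [if_pos hyl, Option.getD_some, List.getElem?_set, hrlen, hxm,
      if_pos, List.getElem?_eq_getElem hyl, Option.getD_some]
    by_cases hjx : j = x.toNat
    · simp [hjx]
    · rw [if_neg (fun h : x.toNat = j => hjx h.symm),
        if_neg (fun h : _ ∧ j = x.toNat => hjx h.2)]
  · rw [List.getElem?_set, if_neg (fun h : y.toNat = i => hiy h.symm),
      if_neg (fun h : i = y.toNat ∧ _ => hiy h.1)]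

lemma floordiv_pos (a b : Int) (hb : 0 < b) : PySem.Int.floordiv a b = a / b := by
  simp [PySem.Int.floordiv, Int.fdiv_eq_ediv, le_of_lt hb]

lemma OK_setBlock (m : Nat) (g : List (List String)) (hg : OKGrid m g) (y x : Int)
    (hy : 0 ≤ y) (hym : y.toNat + 2 ≤ m) :
    OKGrid m (setBlock g y x) := by
  have o1 := OK_setCell m g hg y x hy (by omega)
  have o2 := OK_setCell m _ o1 y (x + 1) hy (by omega)
  have o3 := OK_setCell m _ o2 (y + 1) x (by omega) (by omega)
  exact OK_setCell m _ o3 (y + 1) (x + 1) (by omega) (by omega)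

lemma cell_setBlock (m : Nat) (g : List (List String)) (hg : OKGrid m g) (y x : Int)
    (hy : 0 ≤ y) (hx : 0 ≤ x) (hym : y.toNat + 2 ≤ m) (hxm : x.toNat + 2 ≤ m) (i j : Nat) :
    cellAt (setBlock g y x) i j =
      if (i = y.toNat ∨ i = y.toNat + 1) ∧ (j = x.toNat ∨ j = x.toNat + 1)
      then some "#" else cellAt g i j := by
  have o1 := OK_setCell m g hg y x hy (by omega)
  have o2 := OK_setCell m _ o1 y (x + 1) hy (by omega)
  have o3 := OK_setCell m _ o2 (y + 1) x (by omega) (by omega)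
  rw [setBlock,
    cell_setCell m _ o3 (y + 1) (x + 1) (by omega) (by omega) (by omega) (by omega) i j,
    cell_setCell m _ o2 (y + 1) x (by omega) hx (by omega) (by omega) i j,
    cell_setCell m _ o1 y (x + 1) hy (by omega) (by omega) (by omega) i j,
    cell_setCell m g hg y x hy hx (by omega) (by omega) i j]
  have e1 : (y + 1).toNat = y.toNat + 1 := by omega
  have e2 : (x + 1).toNat = x.toNat + 1 := by omega
  rw [e1, e2]
  split_ifs <;> first | rfl | omega

-- the test of A's loop body, as one boolean
def condA (y x : Int) : Bool :=
  if PySem.Int.mod y 4 = 0 then PySem.Int.mod x 4 = 0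
  else if PySem.Int.mod y 2 = 0 then PySem.Int.mod (x + 2) 4 = 0
  else false

-- does the block at (y, x) write cell (i, j)?
def hitB (y x : Int) (i j : Nat) : Bool :=
  decide ((i = y.toNat ∨ i = y.toNat + 1) ∧ (j = x.toNat ∨ j = x.toNat + 1))

lemma step_eq (y x : Int) (g : List (List String)) :
    (if PySem.Int.mod y 4 = 0 then
        if PySem.Int.mod x 4 = 0 then setBlock g y x else g
      else if PySem.Int.mod y 2 = 0 then
        if PySem.Int.mod (x + 2) 4 = 0 then setBlock g y x else g
      else g)
    = if condA y x then setBlock g y x else g := by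
  unfold condA
  split_ifs <;> simp_all

lemma inner_fold (m : Nat) (y : Int) (hy : 0 ≤ y) (hym : y.toNat + 2 ≤ m)
    (xs : List Int) (hxs : ∀ x ∈ xs, 0 ≤ x ∧ x.toNat + 2 ≤ m)
    (g : List (List String)) (hg : OKGrid m g) :
    OKGrid m (xs.foldl (fun ans x => if condA y x then setBlock ans y x else ans) g)
    ∧ ∀ i j, cellAt (xs.foldl (fun ans x => if condA y x then setBlock ans y x else ans) g) i j
        = if xs.any (fun x => condA y x && hitB y x i j) then some "#" else cellAt g i j := by
  induction xs generalizing g with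
  | nil => simpa using hg
  | cons x xs ih =>
    have hx := hxs x (by simp)
    have hg' : OKGrid m (if condA y x then setBlock g y x else g) := by
      split
      · exact OK_setBlock m g hg y x hy hym
      · exact hg
    obtain ⟨okf, hcell⟩ := ih (fun z hz => hxs z (by simp [hz])) _ hg'
    refine ⟨by simpa using okf, ?_⟩
    intro i j
    rw [List.foldl_cons, hcell i j, List.any_cons]
    by_cases hrest : xs.any (fun x => condA y x && hitB y x i j)
    · simp [hrest]
    · simp only [Bool.not_eq_true] at hrest
      rw [hrest]
      simp only [Bool.or_false, Bool.false_eq_true, if_false]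
      by_cases hc : condA y x
      · rw [if_pos hc, cell_setBlock m g hg y x hy hx.1 hym hx.2 i j]
        by_cases hh : (i = y.toNat ∨ i = y.toNat + 1) ∧ (j = x.toNat ∨ j = x.toNat + 1)
        · simp [hh, hitB, hc]
        · simp [hh, hitB, hc]
      · simp [hc, hitB]
    
lemma outer_fold (m : Nat) (xs : List Int) (hxs : ∀ x ∈ xs, 0 ≤ x ∧ x.toNat + 2 ≤ m)
    (ys : List Int) (hys : ∀ y ∈ ys, 0 ≤ y ∧ y.toNat + 2 ≤ m)
    (g : List (List String)) (hg : OKGrid m g) :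
    OKGrid m (ys.foldl (fun ans y =>
        xs.foldl (fun ans x => if condA y x then setBlock ans y x else ans) ans) g)
    ∧ ∀ i j, cellAt (ys.foldl (fun ans y =>
          xs.foldl (fun ans x => if condA y x then setBlock ans y x else ans) ans) g) i j
        = if ys.any (fun y => xs.any (fun x => condA y x && hitB y x i j))
          then some "#" else cellAt g i j := by
  induction ys generalizing g with
  | nil => simpa using hg
  | cons y ys ih =>
    have hy := hys y (by simp)
    obtain ⟨ok1, hc1⟩ := inner_fold m y hy.1 hy.2 xs hxs g hg
    obtain ⟨okf, hcell⟩ := ih (fun z hz => hys z (by simp [hz])) _ ok1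
    refine ⟨by simpa using okf, ?_⟩
    intro i j
    rw [List.foldl_cons, hcell i j, List.any_cons, hc1 i j]
    by_cases hrest : ys.any (fun y => xs.any (fun x => condA y x && hitB y x i j))
    · simp [hrest]
    · simp only [hrest, Bool.or_false]
      split_ifs <;> simp_all

lemma condA_iff (y x : Int) :
    condA y x = true ↔
      (y % 4 = 0 ∧ x % 4 = 0) ∨ (¬ y % 4 = 0 ∧ y % 2 = 0 ∧ (x + 2) % 4 = 0) := by
  unfold condA
  simp only [fmod_pos _ 4 (by norm_num), fmod_pos _ 2 (by norm_num)]
  split_ifs with h1 h2 <;> simp_all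

lemma any_iff (b : Int) (i j : Nat) (hi : (i : Int) < b) (hj : (j : Int) < b) :
    ((PySem.List.pyRange 0 b 2).any (fun y =>
        (PySem.List.pyRange 0 b 2).any (fun x => condA y x && hitB y x i j)) = true)
    ↔ ((i : Int) / 2 + (j : Int) / 2) % 2 = 0 := by
  simp only [List.any_eq_true, PySem.List.mem_pyRange_iff_of_pos (by norm_num : (0:Int) < 2),
    Bool.and_eq_true, condA_iff, hitB, decide_eq_true_eq]
  constructor
  · rintro ⟨y, hy, x, hx, hc, hh⟩
    omega
  · intro h
    exact ⟨2 * ((i : Int) / 2), by omega, 2 * ((j : Int) / 2), by omega, by omega, by omega⟩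

lemma eq_of_cells (m : Nat) (G H : List (List String)) (hG : OKGrid m G) (hH : OKGrid m H)
    (h : ∀ i j, i < m → j < m → cellAt G i j = cellAt H i j) : G = H := by
  obtain ⟨hG1, hG2⟩ := hG
  obtain ⟨hH1, hH2⟩ := hH
  apply List.ext_getElem?
  intro i
  by_cases him : i < m
  · have hiG : i < G.length := by omega
    have hiH : i < H.length := by omega
    rw [List.getElem?_eq_getElem hiG, List.getElem?_eq_getElem hiH]
    congr 1
    apply List.ext_getElem?
    intro j
    by_cases hjm : j < m
    · have := h i j him hjm
      simpa [cellAt, List.getElem?_eq_getElem hiG, List.getElem?_eq_getElem hiH] using this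
    · rw [List.getElem?_eq_none, List.getElem?_eq_none]
      · rw [hH2 _ (List.getElem_mem hiH)]; omega
      · rw [hG2 _ (List.getElem_mem hiG)]; omega
  · rw [List.getElem?_eq_none (by omega), List.getElem?_eq_none (by omega)]

-- the m×m grid of the B port, and the all-'.' initial grid of the A port
lemma OK_mapGrid (m : Nat) (f : Int → Int → String) :
    OKGrid m ((PySem.List.pyRange 0 (m : Int) 1).map (fun i =>
      (PySem.List.pyRange 0 (m : Int) 1).map (fun j => f i j))) := by
  constructor
  · simp [PySem.List.length_pyRange_one]
  · intro r hr
    rcases List.mem_map.mp hr with ⟨_, _, rfl⟩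
    simp [PySem.List.length_pyRange_one]

lemma cell_mapGrid (m : Nat) (f : Int → Int → String) (i j : Nat) (him : i < m) (hjm : j < m) :
    cellAt ((PySem.List.pyRange 0 (m : Int) 1).map (fun i =>
      (PySem.List.pyRange 0 (m : Int) 1).map (fun j => f i j))) i j = some (f i j) := by
  simp only [cellAt]
  rw [PySem.List.getElem?_map_pyRange_zero _ m i him, Option.getD_some,
    PySem.List.getElem?_map_pyRange_zero _ m j hjm]

-- ===== VERDICT (by name: the statement is the Claim_ definition above) =====
theorem solve_spec : Claim_equal_solve := by
  intro n _
  unfold Spec_solve solve solve_alt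
  by_cases hn : n * 2 ≤ 0
  · rw [PySem.List.pyRange_one_eq_nil hn]
    have h2 : PySem.List.pyRange 0 (n * 2) 2 = [] := by
      rw [PySem.List.pyRange_of_pos _ _ (by norm_num : (0:Int) < 2)]
      simp [show ¬ (0 : Int) < n * 2 by omega]
    simp [h2]
  · rw [Int.not_le] at hn
    have hm : (((n * 2).toNat : Int)) = n * 2 := by omega
    rw [show (n * 2 : Int) = (((n * 2).toNat : Nat) : Int) from hm.symm]
    set m : Nat := (n * 2).toNat with hmdef
    have hbound : ∀ x ∈ PySem.List.pyRange 0 (m : Int) 2, 0 ≤ x ∧ x.toNat + 2 ≤ m := by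
      intro x hx
      rw [PySem.List.mem_pyRange_iff_of_pos (by norm_num : (0:Int) < 2)] at hx
      omega
    obtain ⟨okf, hcell⟩ := outer_fold m _ hbound _ hbound _
      (OK_mapGrid m (fun _ _ => "."))
    simp only [step_eq]
    apply eq_of_cells m _ _ okf (OK_mapGrid m _)
    intro i j him hjm
    rw [hcell i j, cell_mapGrid m _ i j him hjm, cell_mapGrid m _ i j him hjm,
      fmod_pos _ 2 (by norm_num), floordiv_pos _ 2 (by norm_num),
      floordiv_pos _ 2 (by norm_num)]
    by_cases hpar : ((i : Int) / 2 + (j : Int) / 2) % 2 = 0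
    · rw [if_pos ((any_iff (m : Int) i j (by omega) (by omega)).mpr hpar), if_pos hpar]
    · rw [if_neg (fun h => hpar ((any_iff (m : Int) i j (by omega) (by omega)).mp h)),
        if_neg hpar]
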